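-- pv_equiv track=rewrite | github.com/quefie/AStar | AStar.py | calculate_heuristic_euclidian_method
-- ===== SOURCE A (Python) =====
-- GRID_SIZE = 20
--
-- def calculate_heuristic_euclidian_method(last):
--     # variables with finish field coordinates
--     x_value_of_finish_field = last[0]
--     y_value_of_finish_field = last[1]
--
--     heuristic_array = [[9 for x in range(GRID_SIZE)] for y in range(GRID_SIZE)]
--     for i in range(GRID_SIZE):
--         for j in range(GRID_SIZE):
--             # fields calculate the lenght to finish field
--             x_to_finish_field = x_value_of_finish_field - i
--             y_to_finish_field = y_value_of_finish_field - j
--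
--             heuristics = abs(x_to_finish_field) + abs(y_to_finish_field)
--             heuristic_array[i][j] = heuristics
--
--     return heuristic_array
-- ===== SOURCE B (Python) =====
-- GRID_SIZE = 20
--
-- def calculate_heuristic_euclidian_method(last):
--     # Separable: grid[i][j] = |x-i| + |y-j|; precompute per-axis tables, then combine.
--     dx = [abs(last[0] - i) for i in range(GRID_SIZE)]
--     dy = [abs(last[1] - j) for j in range(GRID_SIZE)]
--     return [[a + b for b in dy] for a in dx]
-- ===== Notes on version B (the rewrite author's own statement) =====
-- stated objective: alternative
-- what changed: B exploits separability of the Manhattan distance: it precomputes two 1-D per-axis distance tables and combines them by comprehension, instead of A's preallocated 9-filled grid mutated in place with both abs values recomputed in the inner loop.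
import Mathlib
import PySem

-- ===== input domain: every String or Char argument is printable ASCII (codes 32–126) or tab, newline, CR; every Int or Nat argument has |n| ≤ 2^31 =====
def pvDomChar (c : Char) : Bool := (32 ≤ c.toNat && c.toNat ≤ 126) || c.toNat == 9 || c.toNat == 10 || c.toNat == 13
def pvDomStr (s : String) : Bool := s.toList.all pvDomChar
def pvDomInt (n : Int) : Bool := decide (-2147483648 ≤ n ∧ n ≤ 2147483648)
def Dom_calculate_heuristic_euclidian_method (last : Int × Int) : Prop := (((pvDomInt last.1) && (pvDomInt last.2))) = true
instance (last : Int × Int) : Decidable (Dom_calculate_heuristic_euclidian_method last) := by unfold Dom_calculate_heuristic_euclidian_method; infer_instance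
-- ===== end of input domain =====

-- B precomputes two 1-D per-axis Manhattan distance tables and combines them, instead of A's in-place-mutated 9-filled grid recomputing both abs values per cell; equivalence of return values proved on all inputs.


-- ===== PORT A =====
-- literal port: build the 20×20 grid of 9s, then mutate each cell heuristic_array[i][j] in a nested loop (modelled by folds carrying the grid)
def calculate_heuristic_euclidian_method (last : Int × Int) : List (List Int) :=
  let x_value_of_finish_field := last.1
  let y_value_of_finish_field := last.2
  let heuristic_array : List (List Int) :=
    (PySem.List.pyRange 0 20 1).map (fun _y => (PySem.List.pyRange 0 20 1).map (fun _x => (9 : Int)))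
  (PySem.List.pyRange 0 20 1).foldl (fun arr i =>
    (PySem.List.pyRange 0 20 1).foldl (fun arr j =>
      let x_to_finish_field := x_value_of_finish_field - i
      let y_to_finish_field := y_value_of_finish_field - j
      let heuristics := |x_to_finish_field| + |y_to_finish_field|
      arr.modify i.toNat (fun row => row.set j.toNat heuristics)) arr) heuristic_array

-- ===== PORT B =====
-- port of Source B: two 1-D per-axis distance tables dx, dy; combine by comprehension
def calculate_heuristic_euclidian_method_alt (last : Int × Int) : List (List Int) :=
  let dx := (PySem.List.pyRange 0 20 1).map (fun i => |last.1 - i|)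
  let dy := (PySem.List.pyRange 0 20 1).map (fun j => |last.2 - j|)
  dx.map (fun a => dy.map (fun b => a + b))

-- ===== PRECONDITION & SPEC =====
def Spec_calculate_heuristic_euclidian_method (last : Int × Int) (out : List (List Int)) : Prop := out = calculate_heuristic_euclidian_method_alt last
instance (last : Int × Int) (out : List (List Int)) : Decidable (Spec_calculate_heuristic_euclidian_method last out) := by unfold Spec_calculate_heuristic_euclidian_method; infer_instance

-- ===== CLAIM (what is proved, stated in full; the proofs are below) =====
def Claim_equal_calculate_heuristic_euclidian_method : Prop := ∀ (last : Int × Int), Dom_calculate_heuristic_euclidian_method last → Spec_calculate_heuristic_euclidian_method last (calculate_heuristic_euclidian_method last)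

-- ===== LEMMAS AND PROOFS =====
-- modifying the same index twice composes the two functions
theorem pv_modify_modify {α : Type} (l : List α) (n : Nat) (f g : α → α) :
    (l.modify n f).modify n g = l.modify n (fun a => g (f a)) := by
  apply List.ext_getElem?
  intro m
  simp only [List.getElem?_modify]
  cases l[m]? <;> simp <;> split <;> simp

theorem pv_modify_id {α : Type} (l : List α) (n : Nat) : l.modify n (fun r => r) = l := by
  apply List.ext_getElem?
  intro m
  simp only [List.getElem?_modify]
  cases l[m]? <;> simp

-- a fold that only modifies row i collapses to a single modify of row i by the folded row update
theorem pv_foldl_modify (i : Nat) (F : List Int → Int → List Int) (js : List Int) (arr : List (List Int)) :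
    js.foldl (fun a j => a.modify i (fun r => F r j)) arr
      = arr.modify i (fun r => js.foldl F r) := by
  induction js generalizing arr with
  | nil => exact (pv_modify_id arr i).symm
  | cons j t ih => rw [List.foldl_cons, ih, pv_modify_modify]; rfl

set_option maxRecDepth 8000 in
theorem pv_pyRange20 : PySem.List.pyRange 0 20 1 =
    [0,1,2,3,4,5,6,7,8,9,10,11,12,13,14,15,16,17,18,19] := by decide

-- ===== VERDICT (by name: the statement is the Claim_ definition above) =====
set_option maxRecDepth 8000 in
set_option maxHeartbeats 2000000 in
theorem calculate_heuristic_euclidian_method_spec : Claim_equal_calculate_heuristic_euclidian_method := by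
  intro last _
  unfold Spec_calculate_heuristic_euclidian_method
  unfold calculate_heuristic_euclidian_method calculate_heuristic_euclidian_method_alt
  simp only [pv_pyRange20, pv_foldl_modify]
  simp [List.foldl, List.modify, List.modifyTailIdx, List.modifyTailIdx.go, List.modifyHead, List.set, List.map]
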